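-- pv_equiv track=rewrite | github.com/dpohanlon/wadjet | wadjet.py | connectedStrips
-- ===== SOURCE A (Python) =====
-- def connectedStrips(strips):
--     """
--     Returns pairs of strip indices that have overlapping component names.
--     """
--
--     # Helper function to extract component names from pins
--     def extract_component_names(strip):
--         return [pin.split("_")[0] for pin in strip]
--
--     connected_pairs = []
--
--     for s1, strip1 in enumerate(strips):
--         names1 = extract_component_names(strip1)
--         for s2 in range(s1 + 1, len(strips)):  # Start from the next strip to avoid duplicates and self-comparisons
--             names2 = extract_component_names(strips[s2])
--             if any(name in names2 for name in names1):
--                 connected_pairs.append((s1, s2))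
--
--     return connected_pairs
-- ===== SOURCE B (Python) =====
-- def connectedStrips(strips):
--     # Inverted index: component name -> ascending list of strip indices containing it,
--     # then emit each strip's later partners from the index (set dedupes, sorted restores order).
--     index = {}
--     for i, strip in enumerate(strips):
--         for pin in strip:
--             index.setdefault(pin.split("_")[0], []).append(i)
--     out = []
--     for i, strip in enumerate(strips):
--         partners = set()
--         for pin in strip:
--             for j in index[pin.split("_")[0]]:
--                 if j > i:
--                     partners.add(j)
--         for j in sorted(partners):
--             out.append((i, j))
--     return out
-- ===== Notes on version B (the rewrite author's own statement) =====
-- stated objective: alternative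
-- what changed: Replaces the all-pairs nested scan (recomputing each strip's component names inside the inner loop) with an inverted index from component name to strip indices, from which each strip's later partners are read off, deduplicated in a set and sorted.
import Mathlib
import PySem

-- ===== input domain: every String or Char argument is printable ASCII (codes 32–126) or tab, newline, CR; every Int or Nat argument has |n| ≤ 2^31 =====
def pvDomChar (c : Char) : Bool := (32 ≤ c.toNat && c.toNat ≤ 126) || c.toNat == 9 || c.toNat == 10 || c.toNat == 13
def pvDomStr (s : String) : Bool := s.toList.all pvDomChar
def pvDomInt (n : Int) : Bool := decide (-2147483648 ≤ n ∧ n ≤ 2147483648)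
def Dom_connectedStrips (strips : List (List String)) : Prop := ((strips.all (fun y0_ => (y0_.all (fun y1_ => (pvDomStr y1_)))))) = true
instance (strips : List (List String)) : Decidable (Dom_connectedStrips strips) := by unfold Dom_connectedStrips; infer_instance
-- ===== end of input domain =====

-- B replaces A's all-pairs nested scan by an inverted component-name index (alternative
-- algorithm, same return value; proof below covers every input).

-- ===== PORT A =====
-- pin.split("_")[0]: split? "_" is always `some` of a nonempty list, so [0] never raises
def pvName (pin : String) : String :=
  PySem.List.pyGetD ((PySem.Str.split? pin "_").getD []) 0 ""

def pvExtractNames (strip : List String) : List String := strip.map pvName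

def connectedStrips (strips : List (List String)) : List (Int × Int) :=
  (PySem.List.enumerate strips 0).foldl (fun acc p =>
    let names1 := pvExtractNames p.2
    (PySem.List.pyRange (p.1 + 1) (strips.length : Int) 1).foldl (fun acc2 s2 =>
      -- strips[s2] with s2 drawn from range(s1+1, len(strips)) is always in range
      let names2 := pvExtractNames (PySem.List.pyGetD strips s2 [])
      if names1.any (fun name => names2.contains name) then acc2 ++ [(p.1, s2)] else acc2) acc) []

-- ===== PORT B =====
-- index.setdefault(name, []).append(i) leaves d[name] = d.get(name, []) + [i]: d.modify name [] (· ++ [i])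
def pvIndex (strips : List (List String)) : PySem.Dict String (List Int) :=
  (PySem.List.enumerate strips 0).foldl (fun d p =>
    p.2.foldl (fun d pin => d.modify (pvName pin) [] (fun l => l ++ [p.1])) d) PySem.Dict.empty

def connectedStrips_alt (strips : List (List String)) : List (Int × Int) :=
  let index := pvIndex strips
  (PySem.List.enumerate strips 0).foldl (fun out p =>
    let partners : PySem.Set Int := p.2.foldl (fun s pin =>
        (index.getD (pvName pin) []).foldl (fun s j => if p.1 < j then PySem.Set.add s j else s) s)
      PySem.Set.empty
    (PySem.List.sorted partners (fun x => x)).foldl (fun out j => out ++ [(p.1, j)]) out) []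

-- ===== PRECONDITION & SPEC =====
def Spec_connectedStrips (strips : List (List String)) (out : List (Int × Int)) : Prop := out = connectedStrips_alt strips
instance (strips : List (List String)) (out : List (Int × Int)) : Decidable (Spec_connectedStrips strips out) := by unfold Spec_connectedStrips; infer_instance

-- ===== CLAIM (what is proved, stated in full; the proofs are below) =====
def Claim_equal_connectedStrips : Prop := ∀ (strips : List (List String)), Dom_connectedStrips strips → Spec_connectedStrips strips (connectedStrips strips)

-- ===== LEMMAS AND PROOFS =====

-- the flat (name, strip-index) pin list, and the index bucket of one name
def pvPins (strips : List (List String)) : List (String × Int) :=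
  (PySem.List.enumerate strips 0).flatMap (fun p => p.2.map (fun pin => (pvName pin, p.1)))

def pvBucket (strips : List (List String)) (c : String) : List Int :=
  ((pvPins strips).filter (fun q => q.1 == c)).map (fun q => q.2)

lemma pvIndex_getD (strips : List (List String)) (c : String) :
    (pvIndex strips).getD c [] = pvBucket strips c := by
  unfold pvIndex pvBucket pvPins
  have h1 : (fun (d : PySem.Dict String (List Int)) (p : Int × List String) =>
      p.2.foldl (fun d pin => d.modify (pvName pin) [] (fun l => l ++ [p.1])) d)
      = fun d p => (p.2.map (fun pin => (pvName pin, p.1))).foldl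
          (fun d q => d.modify q.1 [] (fun l => l ++ [q.2])) d := by
    funext d p; rw [List.foldl_map]
  rw [h1, ← List.foldl_flatMap, PySem.Dict.getD_foldl_modify_append]
  rw [PySem.Dict.getD_empty]
  simp

lemma pvBucket_mem (strips : List (List String)) (c : String) (j : Int) :
    j ∈ pvBucket strips c ↔ ∃ (k : Nat) (h : k < strips.length), j = (k : Int) ∧ c ∈ pvExtractNames strips[k] := by
  unfold pvBucket pvPins pvExtractNames
  constructor
  · intro hj
    obtain ⟨q, hqf, rfl⟩ := List.mem_map.1 hj
    obtain ⟨hqp, hc⟩ := List.mem_filter.1 hqf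
    obtain ⟨p, hpe, hqm⟩ := List.mem_flatMap.1 hqp
    obtain ⟨k, hk, rfl⟩ := (PySem.List.mem_enumerate_iff _ _ _).1 hpe
    obtain ⟨pin, hpin, rfl⟩ := List.mem_map.1 hqm
    have hcc : pvName pin = c := by simpa using hc
    refine ⟨k, hk, by simp, ?_⟩
    subst hcc
    exact List.mem_map.2 ⟨pin, hpin, rfl⟩
  · rintro ⟨k, hk, rfl, hc⟩
    obtain ⟨pin, hpin, rfl⟩ := List.mem_map.1 hc
    refine List.mem_map.2 ⟨(pvName pin, ((0:Int) + k)), ?_, by simp⟩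
    refine List.mem_filter.2 ⟨List.mem_flatMap.2 ⟨((0:Int) + k, strips[k]), ?_, ?_⟩, by simp⟩
    · exact (PySem.List.mem_enumerate_iff _ _ _).2 ⟨k, hk, rfl⟩
    · exact List.mem_map.2 ⟨pin, hpin, rfl⟩

-- membership in the inner conditional set-building fold
lemma pvInnerFold_mem (l : List Int) (i : Int) (s : PySem.Set Int) (j : Int) :
    j ∈ l.foldl (fun s j' => if i < j' then PySem.Set.add s j' else s) s ↔ j ∈ s ∨ (j ∈ l ∧ i < j) := by
  induction l generalizing s with
  | nil => simp
  | cons a l ih =>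
    simp only [List.foldl_cons]
    by_cases hia : i < a
    · rw [if_pos hia, ih]
      simp only [PySem.Set.mem_add, List.mem_cons]
      constructor
      · rintro ((h | rfl) | ⟨hl, hij⟩)
        · exact Or.inl h
        · exact Or.inr ⟨Or.inl rfl, hia⟩
        · exact Or.inr ⟨Or.inr hl, hij⟩
      · rintro (h | ⟨(rfl | hl), hij⟩)
        · exact Or.inl (Or.inl h)
        · exact Or.inl (Or.inr rfl)
        · exact Or.inr ⟨hl, hij⟩
    · rw [if_neg hia, ih]
      simp only [List.mem_cons]
      constructor
      · rintro (h | ⟨hl, hij⟩)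
        · exact Or.inl h
        · exact Or.inr ⟨Or.inr hl, hij⟩
      · rintro (h | ⟨(rfl | hl), hij⟩)
        · exact Or.inl h
        · exact absurd hij hia
        · exact Or.inr ⟨hl, hij⟩

lemma pvInnerFold_nodup (l : List Int) (i : Int) (s : PySem.Set Int) (h : s.Nodup) :
    (l.foldl (fun s j' => if i < j' then PySem.Set.add s j' else s) s).Nodup := by
  induction l generalizing s with
  | nil => exact h
  | cons a l ih =>
    simp only [List.foldl_cons]
    by_cases hia : i < a
    · rw [if_pos hia]; exact ih _ (PySem.Set.nodup_add _ _ h)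
    · rw [if_neg hia]; exact ih _ h

-- membership in a strip's partner set
lemma pvPartners_mem (strip : List String) (B : String → List Int) (i : Int) (s : PySem.Set Int) (j : Int) :
    j ∈ strip.foldl (fun s pin => (B pin).foldl (fun s j' => if i < j' then PySem.Set.add s j' else s) s) s ↔
      j ∈ s ∨ ∃ pin ∈ strip, j ∈ B pin ∧ i < j := by
  induction strip generalizing s with
  | nil => simp
  | cons pin strip ih =>
    simp only [List.foldl_cons]
    rw [ih, pvInnerFold_mem]
    simp only [List.mem_cons]
    constructor
    · rintro ((h | ⟨hb, hij⟩) | ⟨pin', hpin', hb, hij⟩)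
      · exact Or.inl h
      · exact Or.inr ⟨pin, Or.inl rfl, hb, hij⟩
      · exact Or.inr ⟨pin', Or.inr hpin', hb, hij⟩
    · rintro (h | ⟨pin', (rfl | hpin'), hb, hij⟩)
      · exact Or.inl (Or.inl h)
      · exact Or.inl (Or.inr ⟨hb, hij⟩)
      · exact Or.inr ⟨pin', hpin', hb, hij⟩

lemma pvPartners_nodup (strip : List String) (B : String → List Int) (i : Int) (s : PySem.Set Int) (h : s.Nodup) :
    (strip.foldl (fun s pin => (B pin).foldl (fun s j' => if i < j' then PySem.Set.add s j' else s) s) s).Nodup := by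
  induction strip generalizing s with
  | nil => exact h
  | cons pin strip ih =>
    simp only [List.foldl_cons]
    exact ih _ (pvInnerFold_nodup _ _ _ h)

def pvPred (strips : List (List String)) (names1 : List String) (s2 : Int) : Bool :=
  names1.any (fun name => (pvExtractNames (PySem.List.pyGetD strips s2 [])).contains name)

lemma pvRange_pairwise (a b : Int) : (PySem.List.pyRange a b 1).Pairwise (· < ·) := by
  rw [PySem.List.pyRange_of_pos a b (by norm_num)]
  exact List.Pairwise.map _ (fun {x y} h => by omega) List.pairwise_lt_range

-- the per-strip agreement: sorted partner set = filtered tail range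
lemma pvKeyStep (strips : List (List String)) (k : Nat) (h : k < strips.length) :
    PySem.List.sorted
      (strips[k].foldl (fun s pin =>
        (pvBucket strips (pvName pin)).foldl (fun s j => if (k : Int) < j then PySem.Set.add s j else s) s)
        PySem.Set.empty) (fun x => x) =
      (PySem.List.pyRange ((k : Int) + 1) (strips.length : Int) 1).filter
        (pvPred strips (pvExtractNames strips[k])) := by
  have hget : ∀ (k' : Nat) (hk' : k' < strips.length), PySem.List.pyGetD strips (k' : Int) [] = strips[k'] := by
    intro k' hk'
    rw [PySem.List.pyGetD_natCast, List.getD_eq_getElem _ _ hk']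
  unfold PySem.Set.empty
  apply PySem.List.sorted_eq_of_perm_of_pairwise_lt
  · rw [List.perm_ext_iff_of_nodup
      (((pvRange_pairwise _ _).filter _).imp (fun h => ne_of_lt h))
      (pvPartners_nodup _ _ _ _ List.nodup_nil)]
    intro a
    rw [List.mem_filter, PySem.List.mem_pyRange_one, pvPartners_mem]
    simp only [List.not_mem_nil, false_or]
    constructor
    · rintro ⟨⟨ha1, ha2⟩, hpred⟩
      unfold pvPred at hpred
      rw [List.any_eq_true] at hpred
      obtain ⟨name, hname, hmem⟩ := hpred
      rw [List.contains_iff_mem] at hmem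
      obtain ⟨pin, hpin, rfl⟩ := List.mem_map.1 hname
      refine ⟨pin, hpin, ?_, by omega⟩
      rw [pvBucket_mem]
      have hna : a = ((a.toNat : Nat) : Int) := by omega
      have hlt : a.toNat < strips.length := by omega
      refine ⟨a.toNat, hlt, by omega, ?_⟩
      rw [hna, hget a.toNat hlt] at hmem
      exact hmem
    · rintro ⟨pin, hpin, hb, hlt⟩
      rw [pvBucket_mem] at hb
      obtain ⟨k', hk', rfl, hc⟩ := hb
      refine ⟨⟨by omega, by omega⟩, ?_⟩
      unfold pvPred
      rw [List.any_eq_true]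
      refine ⟨pvName pin, List.mem_map.2 ⟨pin, hpin, rfl⟩, ?_⟩
      rw [List.contains_iff_mem, hget k' hk']
      exact hc
  · exact (pvRange_pairwise _ _).filter _

lemma pvA_norm (strips : List (List String)) :
    connectedStrips strips = (PySem.List.enumerate strips 0).flatMap (fun p =>
      ((PySem.List.pyRange (p.1 + 1) (strips.length : Int) 1).filter
        (pvPred strips (pvExtractNames p.2))).map (fun s2 => (p.1, s2))) := by
  unfold connectedStrips
  have h : ∀ (acc : List (Int × Int)) (p : Int × List String),
      (PySem.List.pyRange (p.1 + 1) (strips.length : Int) 1).foldl (fun acc2 s2 =>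
        if (pvExtractNames p.2).any (fun name => (pvExtractNames (PySem.List.pyGetD strips s2 [])).contains name)
        then acc2 ++ [(p.1, s2)] else acc2) acc
      = acc ++ ((PySem.List.pyRange (p.1 + 1) (strips.length : Int) 1).filter
          (pvPred strips (pvExtractNames p.2))).map (fun s2 => (p.1, s2)) := by
    intro acc p
    exact PySem.List.foldl_append_if (pvPred strips (pvExtractNames p.2)) (fun s2 => (p.1, s2)) _ acc
  simp only [h]
  rw [PySem.List.foldl_append_eq_flatMap]
  simp

lemma pvB_norm (strips : List (List String)) :
    connectedStrips_alt strips = (PySem.List.enumerate strips 0).flatMap (fun p =>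
      (PySem.List.sorted
        (p.2.foldl (fun s pin =>
          (pvBucket strips (pvName pin)).foldl (fun s j => if p.1 < j then PySem.Set.add s j else s) s)
          PySem.Set.empty) (fun x => x)).map (fun j => (p.1, j))) := by
  unfold connectedStrips_alt
  simp only [pvIndex_getD, PySem.List.foldl_append_singleton_eq_map]
  rw [PySem.List.foldl_append_eq_flatMap]
  simp

-- ===== VERDICT (by name: the statement is the Claim_ definition above) =====
theorem connectedStrips_spec : Claim_equal_connectedStrips := by
  intro strips _
  show connectedStrips strips = connectedStrips_alt strips
  rw [pvA_norm, pvB_norm]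
  apply List.flatMap_congr
  intro p hp
  obtain ⟨k, hk, rfl⟩ := (PySem.List.mem_enumerate_iff _ _ _).1 hp
  simp only [zero_add]
  rw [pvKeyStep strips k hk]
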